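-- pv_equiv track=rewrite | github.com/daniel-reich/ubiquitous-fiesta | yC2HzHNRymWQmCj6N_3.py | less_or_equal
-- ===== SOURCE A (Python) =====
-- def less_or_equal(lst, k):
--   for x in lst:
--     if k:
--       if sum(y<=x for y in lst)==k:
--         return x
--     else:
--       if lst==[1]:
--         return None
--       else:
--         return 1
--   return None
-- ===== SOURCE B (Python) =====
-- def less_or_equal(lst, k):
--     le = {}
--     i = 0
--     for v in sorted(lst):
--         i += 1
--         le[v] = i
--     for v in lst:
--         if le[v] == k:
--             return v
--     return None
-- ===== Notes on version B (the rewrite author's own statement) =====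
-- stated objective: faster
-- what changed: B sorts once and builds a value->(count of elements <= value) dict from the sorted positions, then scans the original order for the first element whose count equals k, replacing A's quadratic inner sum; B also drops A's k==0 branch that returns the literal 1.
-- intended difference: For k == 0 and a nonempty lst other than [1], A returns the literal 1 regardless of the list's contents, while B returns None, the intended value since every element has at least itself <= it, so no element can have exactly 0 elements <= it. — e.g. on less_or_equal([2], 0): A returns some 1, B returns none
import Mathlib
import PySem

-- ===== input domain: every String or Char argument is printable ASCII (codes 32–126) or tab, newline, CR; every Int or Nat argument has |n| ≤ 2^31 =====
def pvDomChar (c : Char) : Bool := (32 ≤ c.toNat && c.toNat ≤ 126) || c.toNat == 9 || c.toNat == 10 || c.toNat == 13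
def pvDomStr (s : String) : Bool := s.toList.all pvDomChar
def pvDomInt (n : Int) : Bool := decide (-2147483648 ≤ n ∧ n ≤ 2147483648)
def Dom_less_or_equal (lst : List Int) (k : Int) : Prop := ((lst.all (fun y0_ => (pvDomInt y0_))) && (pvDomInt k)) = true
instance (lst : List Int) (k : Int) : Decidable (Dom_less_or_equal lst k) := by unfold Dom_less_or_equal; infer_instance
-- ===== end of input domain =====

-- B replaces A's quadratic per-element counting with one sort plus a value->count dict,
-- and drops A's k==0 branch that returns the literal 1 (B returns None there; see D_).

-- ===== PORT A =====
-- the for-x-in-lst loop of A; 'lst' stays the full list for the inner sum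
def lessOrEqualLoopA (rest lst : List Int) (k : Int) : Option Int :=
  match rest with
  | [] => none
  | x :: rs =>
    if k ≠ 0 then
      if (lst.foldl (fun acc y => acc + (if y ≤ x then (1 : Int) else 0)) 0) = k then some x
      else lessOrEqualLoopA rs lst k
    else
      if lst = [1] then none else some 1

def less_or_equal (lst : List Int) (k : Int) : Option Int :=
  lessOrEqualLoopA lst lst k

-- ===== PORT B =====
-- first loop of B: for v in sorted(lst): i += 1; le[v] = i
def buildLE (s : List Int) (i : Int) (le : PySem.Dict Int Int) : PySem.Dict Int Int :=
  match s with
  | [] => le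
  | v :: rs => buildLE rs (i + 1) (le.insert v (i + 1))

-- second loop of B: for v in lst: if le[v] == k: return v
-- le[v]: every v of lst is a key of le, so the lookup never raises; getD 0 is exact here
def scanLE (rest : List Int) (le : PySem.Dict Int Int) (k : Int) : Option Int :=
  match rest with
  | [] => none
  | v :: rs => if le.getD v 0 = k then some v else scanLE rs le k

def less_or_equal_alt (lst : List Int) (k : Int) : Option Int :=
  scanLE lst (buildLE (PySem.List.sorted lst (fun x => x) false) 0 PySem.Dict.empty) k

-- ===== PRECONDITION & SPEC =====
-- For k == 0 and a nonempty lst other than [1], A returns the literal 1 regardless of the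
-- list's contents, while B returns None, the intended value: every element has at least
-- itself ≤ it, so no element can have exactly 0 elements ≤ it.
def D_less_or_equal (lst : List Int) (k : Int) : Prop := k = 0 ∧ lst ≠ [] ∧ lst ≠ [1]
instance (lst : List Int) (k : Int) : Decidable (D_less_or_equal lst k) := by unfold D_less_or_equal; infer_instance

def Spec_less_or_equal (lst : List Int) (k : Int) (out : Option Int) : Prop := ¬ D_less_or_equal lst k → out = less_or_equal_alt lst k
instance (lst : List Int) (k : Int) (out : Option Int) : Decidable (Spec_less_or_equal lst k out) := by unfold Spec_less_or_equal; infer_instance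

def pvDiffWitness_less_or_equal : List Int × Int := ([2], 0)
def pvDiffWitnessOut_less_or_equal : (Option Int) × (Option Int) := (some 1, none)

-- ===== CLAIM (what is proved, stated in full; the proofs are below) =====
def Claim_unchanged_less_or_equal : Prop := ∀ (lst : List Int) (k : Int), Dom_less_or_equal lst k → Spec_less_or_equal lst k (less_or_equal lst k)
def Claim_changed_less_or_equal : Prop := Dom_less_or_equal (pvDiffWitness_less_or_equal.1) (pvDiffWitness_less_or_equal.2) ∧ D_less_or_equal (pvDiffWitness_less_or_equal.1) (pvDiffWitness_less_or_equal.2) ∧ less_or_equal (pvDiffWitness_less_or_equal.1) (pvDiffWitness_less_or_equal.2) = pvDiffWitnessOut_less_or_equal.1 ∧ less_or_equal_alt (pvDiffWitness_less_or_equal.1) (pvDiffWitness_less_or_equal.2) = pvDiffWitnessOut_less_or_equal.2 ∧ pvDiffWitnessOut_less_or_equal.1 ≠ pvDiffWitnessOut_less_or_equal.2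
def Claim_exact_less_or_equal : Prop := ∀ (lst : List Int) (k : Int), Dom_less_or_equal lst k → D_less_or_equal lst k → less_or_equal lst k ≠ less_or_equal_alt lst k

-- ===== LEMMAS AND PROOFS =====

-- the dict produced by B's first loop: on a ≤-sorted list s, the final value stored at a
-- key v ∈ s is i plus the number of elements of s that are ≤ v; other keys are untouched.
theorem buildLE_getD (s : List Int) (hs : s.Pairwise (· ≤ ·)) :
    ∀ (i : Int) (le : PySem.Dict Int Int) (v : Int),
      (buildLE s i le).getD v 0 =
        if v ∈ s then i + ((s.countP (fun y => decide (y ≤ v))) : Int) else le.getD v 0 := by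
  induction s with
  | nil => intro i le v; simp [buildLE]
  | cons a rs ih =>
    intro i le v
    rcases List.pairwise_cons.mp hs with ⟨ha, hrs⟩
    rw [buildLE, ih hrs]
    by_cases hvr : v ∈ rs
    · have hav : a ≤ v := ha v hvr
      simp [hvr, hav]
      ring
    · by_cases hva : v = a
      · subst hva
        have h0 : rs.countP (fun y => decide (y ≤ v)) = 0 := by
          apply List.countP_eq_zero.mpr
          intro y hy
          simp only [decide_eq_true_eq]
          intro hyv
          exact hvr (le_antisymm hyv (ha y hy) ▸ hy)
        simp [hvr, h0, PySem.Dict.getD, PySem.Dict.get?_insert_self]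
      · simp [hvr, hva, PySem.Dict.getD_insert]

-- A's inner sum is a count
theorem foldl_sum_le (lst : List Int) (x : Int) (c : Int) :
    lst.foldl (fun acc y => acc + (if y ≤ x then (1 : Int) else 0)) c
      = c + ((lst.countP (fun y => decide (y ≤ x))) : Int) := by
  induction lst generalizing c with
  | nil => simp
  | cons a rs ih => by_cases h : a ≤ x <;> simp [ih, h] <;> push_cast <;> ring

-- the value B's dict assigns to any element of lst
theorem le_dict_value (lst : List Int) (v : Int) (hv : v ∈ lst) :
    (buildLE (PySem.List.sorted lst (fun x => x) false) 0 PySem.Dict.empty).getD v 0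
      = ((lst.countP (fun y => decide (y ≤ v))) : Int) := by
  have hperm := PySem.List.sorted_perm lst (fun x => x) false
  have hmem : v ∈ PySem.List.sorted lst (fun x => x) false := (PySem.List.mem_sorted lst (fun x => x) false v).mpr hv
  rw [buildLE_getD _ (by simpa using PySem.List.sorted_pairwise lst (fun x => x)) 0 _ v]
  simp [hmem, hperm.countP_eq]

-- the two loops agree step by step when k ≠ 0
theorem loops_agree (lst : List Int) (k : Int) (hk : k ≠ 0) :
    ∀ rest : List Int, (∀ v ∈ rest, v ∈ lst) →
      lessOrEqualLoopA rest lst k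
        = scanLE rest (buildLE (PySem.List.sorted lst (fun x => x) false) 0 PySem.Dict.empty) k := by
  intro rest
  induction rest with
  | nil => intro _; simp [lessOrEqualLoopA, scanLE]
  | cons x rs ih =>
    intro hsub
    have hx : x ∈ lst := hsub x (by simp)
    rw [lessOrEqualLoopA, scanLE, if_pos hk, foldl_sum_le, le_dict_value lst x hx,
        ih (fun v hv => hsub v (by simp [hv]))]
    simp

-- when k = 0, B's scan never fires: every stored count is ≥ 1
theorem scan_zero (lst : List Int) :
    ∀ rest : List Int, (∀ v ∈ rest, v ∈ lst) →
      scanLE rest (buildLE (PySem.List.sorted lst (fun x => x) false) 0 PySem.Dict.empty) 0 = none := by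
  intro rest
  induction rest with
  | nil => intro _; simp [scanLE]
  | cons x rs ih =>
    intro hsub
    have hx : x ∈ lst := hsub x (by simp)
    have hpos : (0:Int) < ((lst.countP (fun y => decide (y ≤ x))) : Int) := by
      have : 0 < lst.countP (fun y => decide (y ≤ x)) :=
        List.countP_pos_iff.mpr ⟨x, hx, by simp⟩
      exact_mod_cast this
    rw [scanLE, le_dict_value lst x hx, if_neg (by omega)]
    exact ih (fun v hv => hsub v (by simp [hv]))

-- ===== VERDICT (by name: the statement is the Claim_ definition above) =====
theorem less_or_equal_spec : Claim_unchanged_less_or_equal := by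
  intro lst k _ hnd
  unfold D_less_or_equal at hnd
  simp only [not_and, not_not, ne_eq] at hnd
  by_cases hk : k = 0
  · subst hk
    rcases List.eq_nil_or_concat lst with hnil | _
    · subst hnil; rfl
    · by_cases hnil : lst = []
      · subst hnil; rfl
      · have h1 : lst = [1] := hnd rfl hnil
        subst h1; decide
  · exact loops_agree lst k hk lst (fun v hv => hv)

theorem less_or_equal_changed : Claim_changed_less_or_equal := by
  unfold Claim_changed_less_or_equal; decide

theorem less_or_equal_tight : Claim_exact_less_or_equal := by
  intro lst k _ hd
  rcases hd with ⟨hk, hnil, hne1⟩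
  subst hk
  have hA : less_or_equal lst 0 = some 1 := by
    rcases lst with _ | ⟨x, rs⟩
    · exact absurd rfl hnil
    · simp [less_or_equal, lessOrEqualLoopA, hne1]
  have hB : less_or_equal_alt lst 0 = none := by
    exact scan_zero lst lst (fun v hv => hv)
  rw [hA, hB]; simp
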